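-- pv_equiv track=rewrite | github.com/IES-Rafael-Alberti/dam1-2425-ejercicios-u1-dcsibon | src/ej01_def.py | titular_v1
-- ===== SOURCE A (Python) =====
-- def titular_v1(frase):
--     palabra = ""
--     frase_titular = ""
--
--     for letra in frase:
--         if letra == " ":
--             frase_titular += palabra[0:1].upper() + palabra[1:].lower() + " "
--             palabra = ""
--         else:
--             palabra += letra
--
--     if len(palabra) > 0:
--         frase_titular += palabra[0:1].upper() + palabra[1:].lower()
--
--     return frase_titular
-- ===== SOURCE B (Python) =====
-- def titular_v1(frase):
--     # Tokenize on single spaces (preserving empty tokens), title-case each token, re-join.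
--     return " ".join(t[0:1].upper() + t[1:].lower() for t in frase.split(" "))
-- ===== Notes on version B (the rewrite author's own statement) =====
-- stated objective: idiomatic
-- what changed: Replaces the character-by-character accumulate-and-flush loop with tokenize-on-the-single-space-separator, map title-case over the tokens, and join, preserving empty tokens from consecutive, leading or trailing separators exactly as A does.
import Mathlib
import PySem

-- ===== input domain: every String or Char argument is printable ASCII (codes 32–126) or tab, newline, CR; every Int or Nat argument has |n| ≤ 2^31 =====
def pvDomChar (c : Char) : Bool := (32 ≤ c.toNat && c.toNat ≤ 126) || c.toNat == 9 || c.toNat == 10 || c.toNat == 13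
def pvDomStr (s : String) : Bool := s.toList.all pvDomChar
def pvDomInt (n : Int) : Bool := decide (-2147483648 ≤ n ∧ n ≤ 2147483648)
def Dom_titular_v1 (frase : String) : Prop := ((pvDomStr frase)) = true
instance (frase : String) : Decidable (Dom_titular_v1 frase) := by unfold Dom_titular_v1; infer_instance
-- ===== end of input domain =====

-- B replaces A's character-by-character accumulate-and-flush loop with split(" ") / map title-case / join; objective: idiomatic.

-- shared helper: palabra[0:1].upper() + palabra[1:].lower()  (the identical expression both Pythons use)
def pvTitleWord (p : List Char) : List Char :=
  PySem.Chars.upper (PySem.List.slice p (some 0) (some 1)) ++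
    PySem.Chars.lower (PySem.List.slice p (some 1) none)

-- ===== PORT A =====
-- A's for-loop over the characters, state = (palabra, frase_titular); then the final flush.
def titular_v1_loop : List Char → List Char → List Char → List Char
  | [], palabra, tit => if palabra.length > 0 then tit ++ pvTitleWord palabra else tit
  | letra :: rest, palabra, tit =>
    if letra = ' ' then titular_v1_loop rest [] (tit ++ pvTitleWord palabra ++ [' '])
    else titular_v1_loop rest (palabra ++ [letra]) tit

def titular_v1 (frase : String) : String :=
  String.ofList (titular_v1_loop frase.toList [] [])

-- ===== PORT B =====
-- frase.split(" ") ported as List.splitOn ' ' (single-character separator), then map + " ".join.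
def titular_v1_alt (frase : String) : String :=
  String.ofList (PySem.Chars.join [' '] ((frase.toList.splitOn ' ').map pvTitleWord))

-- ===== PRECONDITION & SPEC =====
def Spec_titular_v1 (frase : String) (out : String) : Prop := out = titular_v1_alt frase
instance (frase : String) (out : String) : Decidable (Spec_titular_v1 frase out) := by unfold Spec_titular_v1; infer_instance

-- ===== CLAIM (what is proved, stated in full; the proofs are below) =====
def Claim_equal_titular_v1 : Prop := ∀ (frase : String), Dom_titular_v1 frase → Spec_titular_v1 frase (titular_v1 frase)

-- ===== LEMMAS AND PROOFS =====

lemma pv_splitOn_append_space (p cs : List Char) (h : ∀ x ∈ p, ¬ (x = ' ')) :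
    (p ++ ' ' :: cs).splitOn ' ' = p :: cs.splitOn ' ' := by
  simp only [List.splitOn]
  exact List.splitOnP_first _ _ (fun x hx => by simpa using h x hx) ' ' (by simp) cs

lemma pv_splitOn_no_space (p : List Char) (h : ∀ x ∈ p, ¬ (x = ' ')) :
    p.splitOn ' ' = [p] := by
  simp only [List.splitOn]
  exact List.splitOnP_eq_single _ _ (fun x hx => by simpa using h x hx)

lemma pv_join_cons (x : List Char) (ys : List (List Char)) (h : ys ≠ []) :
    PySem.Chars.join [' '] (x :: ys) = x ++ ' ' :: PySem.Chars.join [' '] ys := by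
  cases ys with
  | nil => exact absurd rfl h
  | cons y ys => simp [PySem.Chars.join, List.intercalate]

lemma pv_titleWord_nil : pvTitleWord [] = [] := by decide

lemma pv_loop_eq (cs : List Char) : ∀ (p t : List Char), (∀ x ∈ p, ¬ (x = ' ')) →
    titular_v1_loop cs p t =
      t ++ PySem.Chars.join [' '] (((p ++ cs).splitOn ' ').map pvTitleWord) := by
  induction cs with
  | nil =>
    intro p t hp
    rw [titular_v1_loop, List.append_nil, pv_splitOn_no_space p hp]
    cases p with
    | nil => simp [pv_titleWord_nil, PySem.Chars.join, List.intercalate]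
    | cons c q => simp [PySem.Chars.join, List.intercalate]
  | cons c rest ih =>
    intro p t hp
    rw [titular_v1_loop]
    by_cases hc : c = ' '
    · subst hc
      rw [if_pos rfl, ih [] _ (by simp), pv_splitOn_append_space p rest hp,
        List.map_cons,
        pv_join_cons _ _ (by
          intro hmap
          exact List.splitOnP_ne_nil _ rest (List.map_eq_nil_iff.mp hmap))]
      simp
    · rw [if_neg hc, ih (p ++ [c]) t (by
        intro x hx
        rcases List.mem_append.mp hx with h1 | h1
        · exact hp x h1
        · simp at h1; subst h1; exact hc)]
      simp

-- ===== VERDICT (by name: the statement is the Claim_ definition above) =====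
theorem titular_v1_spec : Claim_equal_titular_v1 := by
  intro frase _
  unfold Spec_titular_v1 titular_v1 titular_v1_alt
  rw [pv_loop_eq frase.toList [] [] (by simp)]
  simp
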